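-- pv_equiv track=rewrite | github.com/suhaibqr/SSH | client_code/devices_filter.py | filter_list_of_lists_by_strings
-- ===== SOURCE A (Python) =====
-- def filter_list_of_lists_by_strings(list_of_lists, strings_to_match):
--     """
--     Filter a list of lists, retaining only the sublists that contain all parts of the specified strings,
--     ignoring spaces, and searching only specific indexes.
--
--     Parameters:
--     list_of_lists (list of lists): A list containing sublists.
--     strings_to_match (str): A string of space-separated words to search for in the sublists.
--
--     Returns:
--     list of lists: A filtered list containing only the sublists that have all parts of the strings to match.
--     """
--     # Define which indexes of sublists can be searched
--     indexes_of_interest = [0,2,3,4,5,10]  # You can modify this to fit your use case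
--
--     # Split the string to match into words, excluding empty strings or spaces
--     words_to_match = [word for word in strings_to_match.lower().split() if word.strip()]
--     filtered_list = []
--
--     for sublist in list_of_lists:
--         # Ensure all words are matched in the specified items in the sublist
--         if all(
--             any(word in str(sublist[i]).lower().replace(" ", "") for i in indexes_of_interest if i < len(sublist))
--             for word in words_to_match
--         ):
--             filtered_list.append(sublist)
--
--     return filtered_list
-- ===== SOURCE B (Python) =====
-- def filter_list_of_lists_by_strings(list_of_lists, strings_to_match):
--     """Repeatedly narrow the candidate list, one query word at a time."""
--     result = list(list_of_lists)
--     for word in strings_to_match.lower().split():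
--         result = [sublist for sublist in result
--                   if any(word in str(sublist[i]).lower().replace(" ", "")
--                          for i in (0, 2, 3, 4, 5, 10) if i < len(sublist))]
--     return result
-- ===== Notes on version B (the rewrite author's own statement) =====
-- stated objective: alternative
-- what changed: Instead of one pass over the sublists testing all(any(...)) per sublist, B iterates over the query words and repeatedly filters a shrinking candidate list (one filter pass per word), dropping A's redundant strip-guard on split() words.
import Mathlib
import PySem

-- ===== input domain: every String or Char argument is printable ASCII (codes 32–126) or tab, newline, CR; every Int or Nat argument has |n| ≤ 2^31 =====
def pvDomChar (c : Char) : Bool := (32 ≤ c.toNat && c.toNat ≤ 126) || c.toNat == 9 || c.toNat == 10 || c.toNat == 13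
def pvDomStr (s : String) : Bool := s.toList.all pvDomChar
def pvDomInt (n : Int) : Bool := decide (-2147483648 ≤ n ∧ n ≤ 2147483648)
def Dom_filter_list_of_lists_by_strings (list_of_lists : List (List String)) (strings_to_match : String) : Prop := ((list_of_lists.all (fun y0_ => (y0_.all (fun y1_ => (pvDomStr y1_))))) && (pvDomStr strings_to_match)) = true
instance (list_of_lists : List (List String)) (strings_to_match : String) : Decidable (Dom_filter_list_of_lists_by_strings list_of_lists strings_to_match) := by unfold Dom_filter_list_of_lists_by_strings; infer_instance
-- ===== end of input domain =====

-- B replaces A's single pass with nested all/any by one filter pass per query word over a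
-- shrinking candidate list (same cost; objective: alternative decomposition).

-- ===== PORT A =====
def filter_list_of_lists_by_strings (list_of_lists : List (List String)) (strings_to_match : String) : List (List String) :=
  let indexes_of_interest : List Nat := [0, 2, 3, 4, 5, 10]
  let words_to_match : List String :=
    (PySem.Str.split₀ (PySem.Str.lower strings_to_match)).filter
      (fun word => !(PySem.Str.strip word == ""))
  list_of_lists.foldl
    (fun filtered_list sublist =>
      if words_to_match.all (fun word =>
          (indexes_of_interest.filter (fun i => i < sublist.length)).any
            (fun i => PySem.Str.isIn word
              (PySem.Str.replace (PySem.Str.lower (sublist.getD i "")) " " "")))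
      then filtered_list ++ [sublist] else filtered_list)
    []

-- ===== PORT B =====
def filter_list_of_lists_by_strings_alt (list_of_lists : List (List String)) (strings_to_match : String) : List (List String) :=
  (PySem.Str.split₀ (PySem.Str.lower strings_to_match)).foldl
    (fun result word =>
      result.filter (fun sublist =>
        ([0, 2, 3, 4, 5, 10].filter (fun i => i < sublist.length)).any
          (fun i => PySem.Str.isIn word
            (PySem.Str.replace (PySem.Str.lower (sublist.getD i "")) " " ""))))
    list_of_lists

-- ===== PRECONDITION & SPEC =====
def Spec_filter_list_of_lists_by_strings (list_of_lists : List (List String)) (strings_to_match : String) (out : List (List String)) : Prop := out = filter_list_of_lists_by_strings_alt list_of_lists strings_to_match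
instance (list_of_lists : List (List String)) (strings_to_match : String) (out : List (List String)) : Decidable (Spec_filter_list_of_lists_by_strings list_of_lists strings_to_match out) := by unfold Spec_filter_list_of_lists_by_strings; infer_instance

-- ===== CLAIM (what is proved, stated in full; the proofs are below) =====
def Claim_equal_filter_list_of_lists_by_strings : Prop := ∀ (list_of_lists : List (List String)) (strings_to_match : String), Dom_filter_list_of_lists_by_strings list_of_lists strings_to_match → Spec_filter_list_of_lists_by_strings list_of_lists strings_to_match (filter_list_of_lists_by_strings list_of_lists strings_to_match)

-- ===== LEMMAS AND PROOFS =====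

-- every element of a nonspace list survives dropWhile isspace
theorem pv_dropWhile_nonspace (l : List Char) (h : ∀ c ∈ l, PySem.Chars.isspace c = false) :
    l.dropWhile PySem.Chars.isspace = l := by
  cases l with
  | nil => rfl
  | cons a t => rw [List.dropWhile_cons_of_neg]; simp [h a (List.mem_cons_self)]

-- invariant of split₀.go: words produced are nonempty and contain no whitespace characters
theorem pv_go_words (s : List Char) : ∀ (cur : List Char) (acc : List (List Char)),
    (∀ c ∈ cur, PySem.Chars.isspace c = false) →
    (∀ w ∈ acc, w ≠ [] ∧ ∀ c ∈ w, PySem.Chars.isspace c = false) →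
    ∀ w ∈ PySem.Chars.split₀.go s cur acc, w ≠ [] ∧ ∀ c ∈ w, PySem.Chars.isspace c = false := by
  induction s with
  | nil =>
    intro cur acc hc ha w hw
    simp only [PySem.Chars.split₀.go] at hw
    split at hw
    · exact ha w (by simpa using hw)
    · rcases (by simpa using hw : w ∈ acc ∨ w = cur.reverse) with h | h
      · exact ha w h
      · subst h
        refine ⟨by simp_all [List.isEmpty_iff], ?_⟩
        intro c hc'; exact hc c (List.mem_reverse.mp hc')
  | cons a t ih =>
    intro cur acc hc ha w hw
    simp only [PySem.Chars.split₀.go] at hw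
    split at hw
    · split at hw
      · exact ih [] acc (by simp) ha w hw
      · refine ih [] (cur.reverse :: acc) (by simp) ?_ w hw
        intro v hv
        rcases List.mem_cons.mp hv with h | h
        · subst h
          refine ⟨by simp_all [List.isEmpty_iff], ?_⟩
          intro c hc'; exact hc c (List.mem_reverse.mp hc')
        · exact ha v h
    · refine ih (a :: cur) acc ?_ ha w hw
      intro c hc'
      rcases List.mem_cons.mp hc' with h | h
      · simp_all
      · exact hc c h

theorem pv_split₀_word (x : List Char) (w : List Char) (hw : w ∈ PySem.Chars.split₀ x) :
    PySem.Chars.strip w = w ∧ w ≠ [] := by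
  have h := pv_go_words x [] [] (by simp) (by simp) w hw
  refine ⟨?_, h.1⟩
  unfold PySem.Chars.strip PySem.Chars.lstrip PySem.Chars.rstrip
  rw [pv_dropWhile_nonspace _ h.2, pv_dropWhile_nonspace, List.reverse_reverse]
  intro c hc; exact h.2 c (List.mem_reverse.mp hc)

-- A's strip-guard is vacuous: split() never yields a whitespace-only word
theorem pv_words_filter (x : String) :
    (PySem.Str.split₀ x).filter (fun word => !(PySem.Str.strip word == "")) = PySem.Str.split₀ x := by
  apply List.filter_eq_self.mpr
  intro w hw
  have hmem : w.toList ∈ PySem.Chars.split₀ x.toList := by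
    rw [← PySem.Str.split₀_map_toList]; exact List.mem_map_of_mem hw
  have h := pv_split₀_word x.toList w.toList hmem
  have hne : (PySem.Str.strip w).toList ≠ [] := by
    rw [PySem.Str.toList_strip, h.1]; exact h.2
  have hne' : PySem.Str.strip w ≠ "" := fun hEq => hne (by rw [hEq]; rfl)
  simpa using hne'

-- repeated filtering by each word equals one filter by the conjunction of all words
theorem pv_foldl_filter_all {α β : Type} (ws : List α) (h : α → β → Bool) (xs : List β) :
    ws.foldl (fun r w => r.filter (h w)) xs = xs.filter (fun s => ws.all (fun w => h w s)) := by
  induction ws generalizing xs with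
  | nil => simp
  | cons w tl ih =>
    rw [List.foldl_cons, ih, List.filter_filter]
    apply List.filter_congr
    intro s _
    simp [Bool.and_comm]

-- ===== VERDICT (by name: the statement is the Claim_ definition above) =====
theorem filter_list_of_lists_by_strings_spec : Claim_equal_filter_list_of_lists_by_strings := by
  intro lol s _
  unfold Spec_filter_list_of_lists_by_strings
  simp only [filter_list_of_lists_by_strings, filter_list_of_lists_by_strings_alt]
  rw [pv_foldl_filter_all, pv_words_filter]
  rw [PySem.List.foldl_append_if _ (fun x => x)]
  simp
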